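-- pv_equiv track=rewrite | github.com/aybasha/206FinalProject | movies_dataDisplay.py | assignGenreColors
-- ===== SOURCE A (Python) =====
-- def assignGenreColors(topGenres):
-- 	colorList = ['blue', 'green', 'red', 'cyan', 'magenta', 'gold', 'black',
-- 				'brown', 'orange', 'darkolivegreen', 'limegreen', 'turquoise',
-- 				'teal', 'indigo', 'skyblue', 'yellow', 'palegreen', 'pink',
-- 				'purple']
-- 	genreList = []
-- 	for year in topGenres:
-- 		for genre in topGenres[year]:
-- 			if genre[0] not in genreList:
-- 				genreList.append(genre[0])
-- 	genreColorDict = {}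
-- 	for x in range(len(genreList)):
-- 		genreColorDict[genreList[x]] = colorList[x]
-- 	return genreList, genreColorDict
-- ===== SOURCE B (Python) =====
-- def assignGenreColors(topGenres):
--     colorList = ['blue', 'green', 'red', 'cyan', 'magenta', 'gold', 'black',
--                  'brown', 'orange', 'darkolivegreen', 'limegreen', 'turquoise',
--                  'teal', 'indigo', 'skyblue', 'yellow', 'palegreen', 'pink',
--                  'purple']
--     # flatten all genre names, then find each name's FIRST index by a
--     # back-to-front overwrite pass; sorting the names by that index
--     # reproduces encounter order.
--     flat = [genre[0] for genreL in topGenres.values() for genre in genreL]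
--     first = {}
--     for i in range(len(flat) - 1, -1, -1):
--         first[flat[i]] = i
--     genreList = sorted(first, key=first.get)
--     return genreList, {g: colorList[x] for x, g in enumerate(genreList)}
-- ===== Notes on version B (the rewrite author's own statement) =====
-- stated objective: alternative
-- what changed: B replaces A's membership-scan dedup plus second indexed mapping pass by a different algorithm: flatten all genre names, record each name's first index with a single back-to-front overwrite pass over a dict, recover encounter order by sorting the distinct names by that first index, and build the color dict from enumerate(genreList).
import Mathlib
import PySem

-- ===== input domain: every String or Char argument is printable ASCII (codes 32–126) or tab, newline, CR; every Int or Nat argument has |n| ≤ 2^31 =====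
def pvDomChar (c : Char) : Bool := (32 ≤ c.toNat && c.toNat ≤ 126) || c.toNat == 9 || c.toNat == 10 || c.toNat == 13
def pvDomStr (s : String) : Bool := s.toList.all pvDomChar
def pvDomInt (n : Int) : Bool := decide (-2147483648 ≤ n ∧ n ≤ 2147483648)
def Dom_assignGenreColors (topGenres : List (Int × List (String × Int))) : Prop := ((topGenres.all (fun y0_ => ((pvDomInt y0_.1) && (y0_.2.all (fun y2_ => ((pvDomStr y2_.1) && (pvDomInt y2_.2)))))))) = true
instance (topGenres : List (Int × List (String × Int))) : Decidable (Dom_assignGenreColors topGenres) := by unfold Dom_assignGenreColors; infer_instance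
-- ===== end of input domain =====

-- B replaces A's membership-scan dedup + second indexed mapping pass by a different algorithm:
-- flatten the names, record each name's first index by a back-to-front overwrite pass, and
-- sort the distinct names by that index (encounter order); objective: alternative decomposition.


-- ===== PORT A =====
def pvColorList : List String :=
  ["blue", "green", "red", "cyan", "magenta", "gold", "black",
   "brown", "orange", "darkolivegreen", "limegreen", "turquoise",
   "teal", "indigo", "skyblue", "yellow", "palegreen", "pink",
   "purple"]

-- A's inner-loop body: 'if genre[0] not in genreList: genreList.append(genre[0])'
def pvStepA (gl : List String) (genre : String × Int) : List String :=
  if gl.contains genre.1 then gl else gl ++ [genre.1]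

def assignGenreColors (topGenres : List (Int × List (String × Int))) : List String × (List (String × String)) :=
  -- 'for year in topGenres: for genre in topGenres[year]': dict iteration over the keys,
  -- with the value looked up by key (Dict.getD; exact for the unique-key dicts Pre_ admits)
  let genreList : List String :=
    topGenres.foldl (fun gl yg =>
      (PySem.Dict.getD (PySem.Dict.mk topGenres) yg.1 []).foldl pvStepA gl) []
  -- 'for x in range(len(genreList)): genreColorDict[genreList[x]] = colorList[x]'
  -- (pyGetD: exact while x is in range of colorList, which Pre_'s ≤ 19 bound guarantees)
  let genreColorDict : PySem.Dict String String :=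
    (PySem.List.pyRange 0 genreList.length 1).foldl (fun d x =>
      PySem.Dict.insert d (PySem.List.pyGetD genreList x "") (PySem.List.pyGetD pvColorList x ""))
      (PySem.Dict.mk [])
  (genreList, genreColorDict.items)

-- ===== PORT B =====
def assignGenreColors_alt (topGenres : List (Int × List (String × Int))) : List String × (List (String × String)) :=
  -- 'flat = [genre[0] for genreL in topGenres.values() for genre in genreL]'
  let flat : List String := topGenres.flatMap (fun genreL => genreL.2.map (fun genre => genre.1))
  -- 'for i in range(len(flat) - 1, -1, -1): first[flat[i]] = i'
  let first : PySem.Dict String Int :=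
    (PySem.List.pyRange ((flat.length : Int) - 1) (-1) (-1)).foldl
      (fun d i => PySem.Dict.insert d (PySem.List.pyGetD flat i "") i) PySem.Dict.empty
  -- 'genreList = sorted(first, key=first.get)'
  let genreList : List String :=
    PySem.List.sorted (PySem.Dict.keys first) (fun g => PySem.Dict.getD first g 0) false
  -- '{g: colorList[x] for x, g in enumerate(genreList)}'
  (genreList,
    ((PySem.List.enumerate genreList 0).foldl
      (fun d p => PySem.Dict.insert d p.2 (PySem.List.pyGetD pvColorList p.1 ""))
      PySem.Dict.empty).items)

-- ===== PRECONDITION & SPEC =====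
-- Pre_ excludes (a) association lists with duplicate year keys, which a Python dict cannot represent
-- (a dict literal collapses them, last value wins), and (b) inputs with more than 19 distinct genre
-- names, on which A raises IndexError (colorList has 19 entries; B raises there too).
def Pre_assignGenreColors (topGenres : List (Int × List (String × Int))) : Prop :=
  (topGenres.map Prod.fst).Nodup ∧
  (PySem.List.dedup (((topGenres.map Prod.snd).flatten).map Prod.fst)).length ≤ 19
instance (topGenres : List (Int × List (String × Int))) : Decidable (Pre_assignGenreColors topGenres) := by unfold Pre_assignGenreColors; infer_instance

def pvWitness_assignGenreColors : (List (Int × List (String × Int))) :=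
  [(2000, [("Drama", 5), ("Comedy", 3)]), (2001, [("Comedy", 1), ("Horror", 2)])]

def Spec_assignGenreColors (topGenres : List (Int × List (String × Int))) (out : List String × (List (String × String))) : Prop := out = assignGenreColors_alt topGenres
instance (topGenres : List (Int × List (String × Int))) (out : List String × (List (String × String))) : Decidable (Spec_assignGenreColors topGenres out) := by unfold Spec_assignGenreColors; infer_instance

-- ===== CLAIM (what is proved, stated in full; the proofs are below) =====
def Claim_equal_assignGenreColors : Prop := ∀ (topGenres : List (Int × List (String × Int))), Dom_assignGenreColors topGenres → Pre_assignGenreColors topGenres → Spec_assignGenreColors topGenres (assignGenreColors topGenres)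

-- ===== LEMMAS AND PROOFS =====

-- the association list both final dicts boil down to: genre number k of L carries colorList[k]
def pvPairup : List String → Int → List (String × String)
  | [], _ => []
  | g :: gs, n => (g, PySem.List.pyGetD pvColorList n "") :: pvPairup gs (n + 1)

theorem pvPairup_append (gl : List String) (g : String) (n : Int) :
    pvPairup (gl ++ [g]) n = pvPairup gl n ++ [(g, PySem.List.pyGetD pvColorList (n + gl.length) "")] := by
  induction gl generalizing n with
  | nil => simp [pvPairup]
  | cons a as ih =>
      have hn : n + ((a :: as).length : Int) = (n + 1) + (as.length : Int) := by
        simp only [List.length_cons]; push_cast; ring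
      rw [hn]
      simp only [List.cons_append, pvPairup, ih]

theorem pvPairup_contains (gl : List String) (g : String) (n : Int) :
    PySem.Dict.contains (PySem.Dict.mk (pvPairup gl n)) g = gl.contains g := by
  induction gl generalizing n with
  | nil => rfl
  | cons a as ih =>
      by_cases h : a = g
      · subst h; simp [pvPairup, PySem.Dict.contains]
      · have hih := ih (n + 1)
        simp only [PySem.Dict.contains, pvPairup, List.any_cons, List.contains_cons] at hih ⊢
        have hne : (a == g) = false := by simp [h]
        have hne' : (g == a) = false := by
          simp only [beq_eq_false_iff_ne, ne_eq]
          exact fun he => h he.symm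
        simp only [hne, Bool.false_or, hih, hne']

-- ===== A-side characterisation =====

theorem pv_foldl_flatMap {α β γ : Type} (f : α → List β) (g : γ → β → γ) :
    ∀ (l : List α) (init : γ),
      (l.flatMap f).foldl g init = l.foldl (fun acc x => (f x).foldl g acc) init := by
  intro l
  induction l with
  | nil => intro init; rfl
  | cons x xs ih =>
      intro init
      simp only [List.flatMap_cons, List.foldl_append, List.foldl_cons, ih]

-- under unique year keys, topGenres[year] is the pair's own value
theorem pv_getD_self (tg : List (Int × List (String × Int)))
    (h : (tg.map Prod.fst).Nodup) (yg : Int × List (String × Int)) (hm : yg ∈ tg) :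
    PySem.Dict.getD (PySem.Dict.mk tg) yg.1 [] = yg.2 := by
  induction tg with
  | nil => cases hm
  | cons p rest ih =>
      simp only [List.map_cons, List.nodup_cons] at h
      rcases List.mem_cons.mp hm with h1 | h2
      · subst h1
        simp [PySem.Dict.getD, PySem.Dict.get?]
      · have hne : p.1 ≠ yg.1 := by
          intro he
          exact h.1 (he ▸ List.mem_map.mpr ⟨yg, h2, rfl⟩)
        have hih := ih h.2 h2
        simp only [PySem.Dict.getD, PySem.Dict.get?] at hih ⊢
        simp [hne, hih]

-- A's genreList is the ordered dedup of the flattened name list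
theorem pv_A_genreList (tg : List (Int × List (String × Int)))
    (h : (tg.map Prod.fst).Nodup) :
    tg.foldl (fun gl yg =>
        (PySem.Dict.getD (PySem.Dict.mk tg) yg.1 []).foldl pvStepA gl) []
      = PySem.Set.ofList (tg.flatMap (fun genreL => genreL.2.map (fun genre => genre.1))) := by
  have hcong : tg.foldl (fun gl yg =>
        (PySem.Dict.getD (PySem.Dict.mk tg) yg.1 []).foldl pvStepA gl) []
      = tg.foldl (fun gl yg => yg.2.foldl pvStepA gl) [] := by
    apply PySem.List.foldl_congr_mem
    intro gl yg hm
    rw [pv_getD_self tg h yg hm]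
  rw [hcong]
  have h3 : PySem.Set.ofList (tg.flatMap (fun genreL => genreL.2.map (fun genre => genre.1)))
      = (tg.flatMap (fun genreL => genreL.2.map (fun genre => genre.1))).foldl PySem.Set.add [] := rfl
  rw [h3, pv_foldl_flatMap (fun genreL => genreL.2.map (fun genre => genre.1)) PySem.Set.add tg []]
  apply PySem.List.foldl_congr_mem
  intro acc yg _
  rw [List.foldl_map]
  rfl

-- A's second loop rebuilds exactly pvPairup of its (nodup) genre list
theorem pv_rangeLoop (full : List String) (hnd : full.Nodup) :
    ∀ (pre gl : List String), pre ++ gl = full →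
    (PySem.List.pyRange (pre.length : Int) (full.length : Int) 1).foldl
      (fun d x => PySem.Dict.insert d (PySem.List.pyGetD full x "") (PySem.List.pyGetD pvColorList x ""))
      (PySem.Dict.mk (pvPairup pre 0))
    = PySem.Dict.mk (pvPairup full 0) := by
  intro pre gl
  induction gl generalizing pre with
  | nil =>
      intro he
      simp only [List.append_nil] at he
      subst he
      rw [PySem.List.pyRange_one_eq_nil (le_refl _)]
      rfl
  | cons g gs ih =>
      intro he
      have hlt : (pre.length : Int) < (full.length : Int) := by
        subst he
        simp only [List.length_append, List.length_cons]
        push_cast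
        omega
      rw [PySem.List.pyRange_one_cons hlt, List.foldl_cons]
      have hget : PySem.List.pyGetD full ((pre.length : Nat) : Int) "" = g := by
        rw [PySem.List.pyGetD_natCast]
        subst he
        simp [List.getD]
      have hnotin : g ∉ pre := by
        subst he
        have h' := List.nodup_append.mp hnd
        intro hg
        exact (h'.2.2 g hg g List.mem_cons_self) rfl
      have hcontains : PySem.Dict.contains (PySem.Dict.mk (pvPairup pre 0)) g = false := by
        rw [pvPairup_contains]
        simpa using hnotin
      have hins : PySem.Dict.insert (PySem.Dict.mk (pvPairup pre 0)) g
            (PySem.List.pyGetD pvColorList ((pre.length : Nat) : Int) "")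
          = PySem.Dict.mk (pvPairup (pre ++ [g]) 0) := by
        rw [PySem.Dict.insert, hcontains]
        simp only [Bool.false_eq_true, if_false]
        rw [pvPairup_append]
        simp only [Int.zero_add]
      rw [hget, hins]
      have hnext := ih (pre ++ [g]) (by simpa using he)
      simpa using hnext

-- ===== B-side characterisation =====

-- the first-index dict B's backward loop builds, as structural recursion on the flat list
def pvFirstDict : List String → Int → PySem.Dict String Int
  | [], _ => PySem.Dict.empty
  | g :: gs, s => (pvFirstDict gs (s + 1)).insert g s

-- the first index of x in the list, counting from offset s
def pvFIdx : List String → String → Int → Option Int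
  | [], _, _ => none
  | g :: gs, x, s => if x = g then some s else pvFIdx gs x (s + 1)

theorem pv_firstDict_foldr (flat : List String) (s : Int) :
    (PySem.List.enumerate flat s).foldr (fun p d => PySem.Dict.insert d p.2 p.1) PySem.Dict.empty
      = pvFirstDict flat s := by
  induction flat generalizing s with
  | nil => rfl
  | cons g gs ih =>
      rw [PySem.List.enumerate_cons, List.foldr_cons, ih]
      rfl

theorem pv_backLoop (flat : List String) :
    (PySem.List.pyRange ((flat.length : Int) - 1) (-1) (-1)).foldl
      (fun d i => PySem.Dict.insert d (PySem.List.pyGetD flat i "") i) PySem.Dict.empty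
      = pvFirstDict flat 0 := by
  have h1 : PySem.List.pyRange ((flat.length : Int) - 1) (-1) (-1)
      = (PySem.List.pyRange 0 (flat.length : Int) 1).reverse := by
    rw [PySem.List.pyRange_neg_one_eq_reverse]
    norm_num
  rw [h1, List.foldl_reverse]
  have h2 := PySem.List.enumerate_eq_map_pyRange flat ""
  simp only [PySem.List.len_eq] at h2
  rw [← pv_firstDict_foldr flat 0, h2, List.foldr_map]

theorem pv_get?_firstDict (flat : List String) (x : String) (s : Int) :
    (pvFirstDict flat s).get? x = pvFIdx flat x s := by
  induction flat generalizing s with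
  | nil => rfl
  | cons g gs ih =>
      simp only [pvFirstDict, pvFIdx, PySem.Dict.get?_insert]
      split_ifs with h
      · rfl
      · exact ih (s + 1)

theorem pv_keys_firstDict_nodup (flat : List String) (s : Int) :
    (pvFirstDict flat s).keys.Nodup := by
  induction flat generalizing s with
  | nil => exact List.nodup_nil
  | cons g gs ih => exact PySem.Dict.nodup_keys_insert _ _ _ (ih (s + 1))

theorem pv_mem_keys_firstDict (flat : List String) (x : String) (s : Int) :
    x ∈ (pvFirstDict flat s).keys ↔ x ∈ flat := by
  induction flat generalizing s with
  | nil => simp [pvFirstDict, PySem.Dict.keys_empty]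
  | cons g gs ih =>
      simp only [pvFirstDict, PySem.Dict.mem_keys_insert, List.mem_cons, ih]

theorem pv_fIdx_of_mem (flat : List String) (x : String) (s : Int) (h : x ∈ flat) :
    ∃ i, pvFIdx flat x s = some i ∧ s ≤ i := by
  induction flat generalizing s with
  | nil => cases h
  | cons g gs ih =>
      by_cases hx : x = g
      · exact ⟨s, by simp [pvFIdx, hx], le_refl s⟩
      · have hm : x ∈ gs := by
          rcases List.mem_cons.mp h with h1 | h2
          · exact absurd h1 hx
          · exact h2
        obtain ⟨i, hi, hsi⟩ := ih (s + 1) hm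
        exact ⟨i, by simp [pvFIdx, hx, hi], by omega⟩

theorem pv_fIdx_cons_of_ne (g : String) (gs : List String) (x : String) (s : Int) (h : x ≠ g) :
    pvFIdx (g :: gs) x s = pvFIdx gs x (s + 1) := by
  simp [pvFIdx, h]

-- ordered dedup, first occurrences: foldl add from any accumulator
theorem pv_ofList_foldl (rest : List String) :
    ∀ acc : List String, rest.foldl PySem.Set.add acc
      = acc ++ (PySem.Set.ofList rest).filter (fun x => !decide (x ∈ acc)) := by
  induction rest with
  | nil => intro acc; simp
  | cons r rs ih =>
      intro acc
      have hof : PySem.Set.ofList (r :: rs)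
          = r :: (PySem.Set.ofList rs).filter (fun x => !decide (x ∈ ([r] : List String))) := by
        show (r :: rs).foldl PySem.Set.add [] = _
        rw [List.foldl_cons]
        rw [show PySem.Set.add [] r = [r] from rfl, ih [r]]
        rfl
      rw [List.foldl_cons, ih (PySem.Set.add acc r), hof]
      by_cases hr : r ∈ acc
      · have hadd : PySem.Set.add acc r = acc := by
          simp [PySem.Set.add, PySem.Set.contains, hr]
        rw [hadd, List.filter_cons]
        have hrn : (!decide (r ∈ acc)) = false := by simp [hr]
        rw [hrn]
        simp only [Bool.false_eq_true, if_false, List.filter_filter, List.append_cancel_left_eq]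
        apply List.filter_congr
        intro x _
        by_cases hxa : x ∈ acc
        · simp [hxa]
        · have hxr : x ≠ r := fun he => hxa (he ▸ hr)
          simp [hxa, hxr]
      · have hadd : PySem.Set.add acc r = acc ++ [r] := by
          simp [PySem.Set.add, PySem.Set.contains, hr]
        rw [hadd, List.filter_cons]
        have hrn : (!decide (r ∈ acc)) = true := by simp [hr]
        rw [hrn]
        simp only [if_true, List.append_assoc, List.singleton_append,
          List.filter_filter, List.append_cancel_left_eq, List.cons.injEq, true_and]
        apply List.filter_congr
        intro x _
        by_cases hxa : x ∈ acc
        · simp [hxa]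
        · by_cases hxr : x = r
          · simp [hxr]
          · simp [hxa, hxr]

theorem pv_set_ofList_cons (r : String) (rs : List String) :
    PySem.Set.ofList (r :: rs)
      = r :: (PySem.Set.ofList rs).filter (fun x => !decide (x ∈ ([r] : List String))) := by
  show (r :: rs).foldl PySem.Set.add [] = _
  rw [List.foldl_cons]
  rw [show PySem.Set.add [] r = [r] from rfl, pv_ofList_foldl rs [r]]
  rfl

-- the ordered dedup is strictly increasing under the first-index key
theorem pv_ofList_pairwise_fIdx (flat : List String) (s : Int) :
    (PySem.Set.ofList flat).Pairwise
      (fun a b => (pvFIdx flat a s).getD 0 < (pvFIdx flat b s).getD 0) := by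
  induction flat generalizing s with
  | nil => exact List.Pairwise.nil
  | cons g gs ih =>
      rw [pv_set_ofList_cons]
      constructor
      · intro b hb
        simp only [List.mem_filter, List.mem_singleton, Bool.not_eq_true', decide_eq_false_iff_not] at hb
        obtain ⟨hbmem, hbne⟩ := hb
        have hbgs : b ∈ gs := (PySem.Set.mem_ofList gs b).mp hbmem
        obtain ⟨i, hi, hsi⟩ := pv_fIdx_of_mem gs b (s + 1) hbgs
        rw [pv_fIdx_cons_of_ne g gs b s hbne, hi]
        have hg : pvFIdx (g :: gs) g s = some s := by simp [pvFIdx]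
        rw [hg]
        simp only [Option.getD_some]
        omega
      · have hf := (ih (s + 1)).filter (fun x => !decide (x ∈ ([g] : List String)))
        apply hf.imp_of_mem
        intro a b ha hb hab
        simp only [List.mem_filter, List.mem_singleton, Bool.not_eq_true', decide_eq_false_iff_not] at ha hb
        rw [pv_fIdx_cons_of_ne g gs a s ha.2, pv_fIdx_cons_of_ne g gs b s hb.2]
        exact hab

-- B's sorted key list is exactly the ordered dedup of the flat list
theorem pv_B_genreList (flat : List String) :
    PySem.List.sorted (pvFirstDict flat 0).keys
      (fun g => PySem.Dict.getD (pvFirstDict flat 0) g 0) false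
      = PySem.Set.ofList flat := by
  apply PySem.List.sorted_eq_of_perm_of_pairwise_lt
  · rw [List.perm_ext_iff_of_nodup (PySem.Set.nodup_ofList flat) (pv_keys_firstDict_nodup flat 0)]
    intro a
    rw [PySem.Set.mem_ofList, pv_mem_keys_firstDict]
  · have hp := pv_ofList_pairwise_fIdx flat 0
    apply hp.imp_of_mem
    intro a b _ _ hab
    simpa [PySem.Dict.getD_eq_get?_getD, pv_get?_firstDict] using hab

-- B's final comprehension is a loop over fresh distinct keys: its items list is pvPairup
theorem pv_enum_map (L : List String) (n : Int) :
    (PySem.List.enumerate L n).map (fun p => (p.2, PySem.List.pyGetD pvColorList p.1 ""))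
      = pvPairup L n := by
  induction L generalizing n with
  | nil => rfl
  | cons g gs ih =>
      rw [PySem.List.enumerate_cons, List.map_cons, pvPairup, ih]

theorem pv_enumLoop (L : List String) (hnd : L.Nodup) :
    ((PySem.List.enumerate L 0).foldl
      (fun d p => PySem.Dict.insert d p.2 (PySem.List.pyGetD pvColorList p.1 ""))
      PySem.Dict.empty).items = pvPairup L 0 := by
  have h := PySem.Dict.items_foldl_insert_fresh (l := PySem.List.enumerate L 0)
    (k := fun p => p.2) (v := fun p => PySem.List.pyGetD pvColorList p.1 "")
    (d := PySem.Dict.empty)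
    (by intro a _; exact PySem.Dict.contains_empty _)
    (by rw [show ((PySem.List.enumerate L 0).map fun p => p.2) = L from PySem.List.map_snd_enumerate L 0]; exact hnd)
  rw [h, pv_enum_map]
  rfl

-- ===== VERDICT (by name: the statement is the Claim_ definition above) =====
theorem assignGenreColors_spec : Claim_equal_assignGenreColors := by
  intro tg _ hpre
  unfold Spec_assignGenreColors assignGenreColors assignGenreColors_alt
  have hnd : (PySem.Set.ofList (tg.flatMap (fun genreL => genreL.2.map (fun genre => genre.1)))).Nodup :=
    PySem.Set.nodup_ofList _
  have hrange := pv_rangeLoop _ hnd []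
      (PySem.Set.ofList (tg.flatMap (fun genreL => genreL.2.map (fun genre => genre.1)))) rfl
  simp only [List.length_nil, Nat.cast_zero] at hrange
  have henum := pv_enumLoop _ hnd
  simp only [pv_backLoop, pv_B_genreList, pv_A_genreList tg hpre.1, henum]
  rw [show PySem.Dict.mk (pvPairup ([] : List String) 0) = PySem.Dict.mk ([] : List (String × String)) from rfl] at hrange
  rw [hrange]
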